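-- pv_equiv track=rewrite | github.com/SARhacking/pocsag-v1-1 | pocsag.py | calculate_bch_3121_sum
-- ===== SOURCE A (Python) =====
-- NUM_BITS_INT = 31
--
-- ADDRESS_MASK = 0xFFFFF800  # Valid data bits 1-21, 22-31 BCH, 32 parity
--
-- G_X = 0x769  # BCH polynomial
--
-- def calculate_bch_3121_sum(x: int) -> int:
--     """Calculate BCH (31,21,5) checksum"""
--     k = 21
--     generator = G_X << k
--     dividend = x & ADDRESS_MASK
--
--     mask = 1 << NUM_BITS_INT
--     for i in range(k):
--         if dividend & mask:
--             dividend ^= generator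
--         generator >>= 1
--         mask >>= 1
--
--     return x | dividend
-- ===== SOURCE B (Python) =====
-- NUM_BITS_INT = 31
--
-- ADDRESS_MASK = 0xFFFFF800  # Valid data bits 1-21, 22-31 BCH, 32 parity
--
-- G_X = 0x769  # BCH polynomial
--
-- def calculate_bch_3121_sum(x: int) -> int:
--     """Calculate BCH (31,21,5) checksum via a 10-bit LFSR over the data bit stream"""
--     data = x & ADDRESS_MASK
--     reg = 0
--     for i in range(31, 0, -1):
--         top = reg >> 9
--         reg = ((reg << 1) & 0x3FF) | ((data >> i) & 1)
--         if top:
--             reg ^= 0x369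
--     return x | (reg << 1)
-- ===== Notes on version B (the rewrite author's own statement) =====
-- stated objective: alternative
-- what changed: Replaced A's in-place polynomial long division on the full machine word (sliding generator and mask registers) with a ten-bit LFSR that shifts the data bits 31..1 through a fixed-width remainder register reduced by the low bits of the generator polynomial.
import Mathlib
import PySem

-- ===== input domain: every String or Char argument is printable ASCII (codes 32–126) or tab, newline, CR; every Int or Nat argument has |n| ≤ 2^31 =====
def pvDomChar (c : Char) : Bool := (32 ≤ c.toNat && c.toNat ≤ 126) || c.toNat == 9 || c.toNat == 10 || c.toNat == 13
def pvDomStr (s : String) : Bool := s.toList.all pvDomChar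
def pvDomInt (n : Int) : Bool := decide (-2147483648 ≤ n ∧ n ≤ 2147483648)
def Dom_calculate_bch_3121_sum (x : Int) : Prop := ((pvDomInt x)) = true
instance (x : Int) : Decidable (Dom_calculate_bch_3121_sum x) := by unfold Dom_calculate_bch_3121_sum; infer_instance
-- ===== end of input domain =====

-- B recomputes the BCH (31,21,5) checksum by streaming the data bits through a
-- ten-bit LFSR register instead of A's in-place long division on the full word
-- (alternative algorithm, same cost; return value only).

-- ===== PORT A =====
def NUM_BITS_INT : Nat := 31  -- Python int constant; Nat here because it is used only as a shift amount

def ADDRESS_MASK : Int := 0xFFFFF800  -- Valid data bits 1-21, 22-31 BCH, 32 parity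

def G_X : Int := 0x769  -- BCH polynomial

-- loop body of A's `for i in range(k)`, state = (dividend, generator, mask)
def pvALoop (st : Int × Int × Int) (_i : Int) : Int × Int × Int :=
  let dividend := st.1
  let generator := st.2.1
  let mask := st.2.2
  let dividend := if PySem.Int.band dividend mask ≠ 0 then PySem.Int.bxor dividend generator else dividend
  (dividend, generator >>> (1 : Nat), mask >>> (1 : Nat))

def calculate_bch_3121_sum (x : Int) : Int :=
  let k : Int := 21
  let generator : Int := G_X <<< (21 : Nat)
  let dividend : Int := PySem.Int.band x ADDRESS_MASK
  let mask : Int := (1 : Int) <<< NUM_BITS_INT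
  let st := (PySem.List.pyRange 0 k 1).foldl pvALoop (dividend, generator, mask)
  PySem.Int.bor x st.1

-- ===== PORT B =====
-- loop body of B's `for i in range(31, 0, -1)`, state = reg
def pvBStep (data : Int) (reg : Int) (i : Int) : Int :=
  let top := reg >>> (9 : Nat)
  let reg' := PySem.Int.bor (PySem.Int.band (reg <<< (1 : Nat)) 0x3FF)
                            (PySem.Int.band (data >>> i.toNat) 1)
  if top ≠ 0 then PySem.Int.bxor reg' 0x369 else reg'

def calculate_bch_3121_sum_alt (x : Int) : Int :=
  let data : Int := PySem.Int.band x ADDRESS_MASK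
  let reg : Int := (PySem.List.pyRange 31 0 (-1)).foldl (pvBStep data) 0
  PySem.Int.bor x (reg <<< (1 : Nat))

-- ===== PRECONDITION & SPEC =====
def Spec_calculate_bch_3121_sum (x : Int) (out : Int) : Prop := out = calculate_bch_3121_sum_alt x
instance (x : Int) (out : Int) : Decidable (Spec_calculate_bch_3121_sum x out) := by unfold Spec_calculate_bch_3121_sum; infer_instance

-- ===== CLAIM (what is proved, stated in full; the proofs are below) =====
def Claim_equal_calculate_bch_3121_sum : Prop := ∀ (x : Int), Dom_calculate_bch_3121_sum x → Spec_calculate_bch_3121_sum x (calculate_bch_3121_sum x)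

-- ===== LEMMAS AND PROOFS =====

-- Nat models of the two loops (the ports never touch negative intermediate values)
def natAStep (st : Nat × Nat × Nat) : Nat × Nat × Nat :=
  ((if st.1 &&& st.2.2 ≠ 0 then st.1 ^^^ st.2.1 else st.1), st.2.1 >>> 1, st.2.2 >>> 1)

def natAIter : Nat → (Nat × Nat × Nat) → Nat × Nat × Nat
  | 0, st => st
  | c + 1, st => natAIter c (natAStep st)

def FA (n : Nat) : Nat := (natAIter 21 (n, 0x769 <<< 21, 1 <<< 31)).1

def natBStep (d : Nat) (r : Nat) (i : Nat) : Nat :=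
  let r' := ((r <<< 1) &&& 1023) ||| ((d >>> i) &&& 1)
  if r >>> 9 ≠ 0 then r' ^^^ 873 else r'

def idxList : List Nat := (List.range 31).map (fun j => 31 - j)

def GB (n : Nat) : Nat := (List.foldl (natBStep n) 0 idxList) <<< 1

-- ---- bridges: ports = casts of the Nat models ----
theorem castA (l : List Int) (a g m : Nat) :
    l.foldl pvALoop ((a : Int), (g : Int), (m : Int)) =
      (((natAIter l.length (a, g, m)).1 : Int), ((natAIter l.length (a, g, m)).2.1 : Int),
        ((natAIter l.length (a, g, m)).2.2 : Int)) := by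
  induction l generalizing a g m with
  | nil => rfl
  | cons i l ih =>
    have hstep : pvALoop ((a : Int), (g : Int), (m : Int)) i =
        (((natAStep (a, g, m)).1 : Int), ((natAStep (a, g, m)).2.1 : Int),
          ((natAStep (a, g, m)).2.2 : Int)) := by
      simp [pvALoop, natAStep, ← Int.natCast_shiftRight, Nat.cast_ne_zero]
    show List.foldl pvALoop (pvALoop (_, _, _) i) l = _
    rw [hstep, ih]
    rfl

theorem castB (n : Nat) (l : List Nat) (r : Nat) :
    (l.map (Nat.cast : Nat → Int)).foldl (pvBStep (n : Int)) (r : Int) =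
      ((l.foldl (natBStep n) r : Nat) : Int) := by
  induction l generalizing r with
  | nil => rfl
  | cons i l ih =>
    have hstep : pvBStep (n : Int) (r : Int) (i : Int) = ((natBStep n r i : Nat) : Int) := by
      simp only [pvBStep, natBStep,
        show ((1023 : Int)) = ((1023 : Nat) : Int) from by norm_num,
        show ((1 : Int)) = ((1 : Nat) : Int) from by norm_num,
        show ((873 : Int)) = ((873 : Nat) : Int) from by norm_num,
        ← Int.natCast_shiftLeft, ← Int.natCast_shiftRight, Int.toNat_natCast,
        PySem.Int.band_natCast, PySem.Int.bor_natCast, PySem.Int.bxor_natCast,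
        Nat.cast_ne_zero]
      split <;> rfl
    simp only [List.map_cons, List.foldl_cons, hstep]
    exact ih (natBStep n r i)

theorem bridgeA (x : Int) (n : Nat) (h : PySem.Int.band x ADDRESS_MASK = (n : Int)) :
    calculate_bch_3121_sum x = PySem.Int.bor x ((FA n : Nat) : Int) := by
  simp only [calculate_bch_3121_sum]
  rw [h, show (G_X <<< (21 : Nat) : Int) = ((0x769 <<< 21 : Nat) : Int) from by decide,
    show ((1 : Int) <<< NUM_BITS_INT) = (((1 <<< 31 : Nat)) : Int) from by decide, castA,
    show (PySem.List.pyRange 0 21 1).length = 21 from by decide]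
  rfl

theorem bridgeB (x : Int) (n : Nat) (h : PySem.Int.band x ADDRESS_MASK = (n : Int)) :
    calculate_bch_3121_sum_alt x = PySem.Int.bor x ((GB n : Nat) : Int) := by
  simp only [calculate_bch_3121_sum_alt]
  rw [h, show PySem.List.pyRange 31 0 (-1) = idxList.map (Nat.cast : Nat → Int) from by decide,
    show ((0 : Int)) = ((0 : Nat) : Int) from rfl, castB, ← Int.natCast_shiftLeft]
  rfl

-- ---- GF(2)-linearity of both models ----
theorem or_eq_xor {a b : Nat} (h : a &&& b = 0) : a ||| b = a ^^^ b := by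
  apply Nat.eq_of_testBit_eq
  intro i
  have := congrArg (fun t => Nat.testBit t i) h
  simp only [Nat.testBit_and, Nat.zero_testBit] at this
  simp only [Nat.testBit_or, Nat.testBit_xor]
  cases ha : a.testBit i <;> cases hb : b.testBit i <;> simp_all

theorem stepA_linear (g m a b : Nat) (hm : m = 0 ∨ ∃ k, m = 2 ^ k) :
    (if (a ^^^ b) &&& m ≠ 0 then (a ^^^ b) ^^^ g else a ^^^ b) =
      (if a &&& m ≠ 0 then a ^^^ g else a) ^^^ (if b &&& m ≠ 0 then b ^^^ g else b) := by
  rcases hm with rfl | ⟨k, rfl⟩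
  · simp
  · have hd : (a ^^^ b) &&& 2 ^ k = (a &&& 2 ^ k) ^^^ (b &&& 2 ^ k) := Nat.and_xor_distrib_right
    rw [hd, Nat.and_two_pow, Nat.and_two_pow]
    cases ha : a.testBit k <;> cases hb : b.testBit k <;>
      simp [(Nat.two_pow_pos k).ne', Nat.xor_assoc, Nat.xor_comm, Nat.xor_left_comm]

theorem iterA_linear (c : Nat) (g m a b : Nat) (hm : m = 0 ∨ ∃ k, m = 2 ^ k) :
    (natAIter c (a ^^^ b, g, m)).1 = (natAIter c (a, g, m)).1 ^^^ (natAIter c (b, g, m)).1 := by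
  induction c generalizing a b g m with
  | zero => rfl
  | succ c ih =>
    show (natAIter c (natAStep _)).1 = (natAIter c (natAStep _)).1 ^^^ (natAIter c (natAStep _)).1
    simp only [natAStep]
    rw [stepA_linear g m a b hm]
    have hm' : m >>> 1 = 0 ∨ ∃ k, m >>> 1 = 2 ^ k := by
      rcases hm with rfl | ⟨k, rfl⟩
      · exact Or.inl rfl
      · rcases k with _ | k
        · exact Or.inl rfl
        · exact Or.inr ⟨k, by rw [Nat.shiftRight_eq_div_pow, pow_succ, pow_one,
            Nat.mul_div_cancel _ (by norm_num)]⟩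
    exact ih _ _ _ _ hm'

theorem FA_linear (a b : Nat) : FA (a ^^^ b) = FA a ^^^ FA b := by
  exact iterA_linear 21 _ _ a b (Or.inr ⟨31, by decide⟩)

theorem stepB_lt (d r i : Nat) : natBStep d r i < 1024 := by
  have h1 : (r <<< 1) &&& 1023 < 1024 := Nat.lt_succ_of_le Nat.and_le_right
  have h2 : (d >>> i) &&& 1 < 1024 := Nat.lt_of_le_of_lt Nat.and_le_right (by norm_num)
  have h3 : ((r <<< 1) &&& 1023) ||| ((d >>> i) &&& 1) < 1024 := by
    have := Nat.or_lt_two_pow (n := 10) (by simpa using h1) (by simpa using h2)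
    simpa using this
  simp only [natBStep]
  split
  · exact (by simpa using Nat.xor_lt_two_pow (n := 10) (by simpa using h3) (by norm_num))
  · exact h3

theorem stepB_linear (d1 d2 r1 r2 i : Nat) (h1 : r1 < 1024) (h2 : r2 < 1024) :
    natBStep (d1 ^^^ d2) (r1 ^^^ r2) i = natBStep d1 r1 i ^^^ natBStep d2 r2 i := by
  have evenand : ∀ u v : Nat, (((u <<< 1) &&& 1023) &&& (v &&& 1)) = 0 := by
    intro u v
    rcases Nat.le_one_iff_eq_zero_or_eq_one.mp (Nat.and_le_right (n := v) (m := 1)) with h | h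
    · rw [h, Nat.and_zero]
    · rw [h, Nat.land_assoc, show (1023 &&& 1 : Nat) = 1 from rfl, Nat.shiftLeft_eq,
        Nat.and_one_is_mod, Nat.mul_mod_left]
  have hsplit : ∀ u v : Nat,
      ((u <<< 1) &&& 1023) ||| (v &&& 1) = ((u <<< 1) &&& 1023) ^^^ (v &&& 1) := fun u v =>
    or_eq_xor (evenand u v)
  have hr' : ((((r1 ^^^ r2) <<< 1) &&& 1023) ||| (((d1 ^^^ d2) >>> i) &&& 1)) =
      ((((r1 <<< 1) &&& 1023) ||| ((d1 >>> i) &&& 1)) ^^^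
        (((r2 <<< 1) &&& 1023) ||| ((d2 >>> i) &&& 1))) := by
    rw [hsplit, hsplit, hsplit, Nat.shiftLeft_xor_distrib, Nat.shiftRight_xor_distrib,
      Nat.and_xor_distrib_right, Nat.and_xor_distrib_right]
    simp [Nat.xor_assoc, Nat.xor_comm, Nat.xor_left_comm]
  have ht : (r1 ^^^ r2) >>> 9 = r1 >>> 9 ^^^ r2 >>> 9 := Nat.shiftRight_xor_distrib
  have hb1 : r1 >>> 9 ≤ 1 := by
    rw [Nat.shiftRight_eq_div_pow]; omega
  have hb2 : r2 >>> 9 ≤ 1 := by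
    rw [Nat.shiftRight_eq_div_pow]; omega
  unfold natBStep
  rw [hr', ht]
  rcases Nat.le_one_iff_eq_zero_or_eq_one.mp hb1 with e1 | e1 <;>
    rcases Nat.le_one_iff_eq_zero_or_eq_one.mp hb2 with e2 | e2 <;>
      simp [e1, e2, Nat.xor_comm, Nat.xor_left_comm]

theorem foldB_linear (l : List Nat) (d1 d2 r1 r2 : Nat) (h1 : r1 < 1024) (h2 : r2 < 1024) :
    l.foldl (natBStep (d1 ^^^ d2)) (r1 ^^^ r2) =
      l.foldl (natBStep d1) r1 ^^^ l.foldl (natBStep d2) r2 := by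
  induction l generalizing r1 r2 with
  | nil => rfl
  | cons i l ih =>
    simp only [List.foldl_cons, stepB_linear d1 d2 r1 r2 i h1 h2]
    exact ih _ _ (stepB_lt d1 r1 i) (stepB_lt d2 r2 i)

theorem GB_linear (a b : Nat) : GB (a ^^^ b) = GB a ^^^ GB b := by
  have h := foldB_linear idxList a b 0 0 (by norm_num) (by norm_num)
  norm_num at h
  unfold GB
  rw [h, Nat.shiftLeft_xor_distrib]

-- ---- basis and main induction ----
theorem basis (c : Nat) (hc : c ≤ 20) : FA (2 ^ (11 + c)) = GB (2 ^ (11 + c)) := by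
  interval_cases c <;> decide

theorem lt_of_testBit_false {n j : Nat} (h : n < 2 ^ (j + 1)) (hb : n.testBit j = false) :
    n < 2 ^ j := by
  have hlt : n / 2 ^ j < 2 := by
    rw [Nat.div_lt_iff_lt_mul (Nat.two_pow_pos j)]
    rw [pow_succ] at h
    omega
  have hb' : n / 2 ^ j % 2 ≠ 1 := by
    intro hcon
    have htrue : n.testBit j = true := by
      simp [Nat.testBit, Nat.shiftRight_eq_div_pow, Nat.one_and_eq_mod_two, hcon]
    rw [htrue] at hb
    exact absurd hb (by simp)
  have h0 : n / 2 ^ j = 0 := by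
    generalize hq : n / 2 ^ j = q at hlt hb'
    omega
  rcases (Nat.div_eq_zero_iff).mp h0 with hz | hlt2
  · exact absurd hz (Nat.two_pow_pos j).ne'
  · exact hlt2

theorem dvd2048_iff (n : Nat) : 2048 ∣ n ↔ n &&& 2047 = 0 := by
  rw [Nat.dvd_iff_mod_eq_zero, show (2048 : Nat) = 2 ^ 11 from rfl,
    show (2047 : Nat) = 2 ^ 11 - 1 from rfl, Nat.and_two_pow_sub_one_eq_mod]

theorem main_ind (c : Nat) (hc : c ≤ 21) : ∀ n, n < 2 ^ (11 + c) → 2048 ∣ n → FA n = GB n := by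
  induction c with
  | zero =>
    intro n hlt hdvd
    have hn0 : n = 0 := by
      rcases hdvd with ⟨t, rfl⟩
      have h2 : (2 : Nat) ^ (11 + 0) = 2048 := by norm_num
      rw [h2] at hlt
      omega
    rw [hn0]
    decide
  | succ c ih =>
    intro n hlt hdvd
    have hlt' : n < 2 ^ ((11 + c) + 1) := by
      rw [show (11 + c) + 1 = 11 + (c + 1) from by omega]
      exact hlt
    by_cases hb : n.testBit (11 + c)
    · have hfalse : (n ^^^ 2 ^ (11 + c)).testBit (11 + c) = false := by
        simp [Nat.testBit_xor, hb, Nat.testBit_two_pow_self]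
      have hlt2 : n ^^^ 2 ^ (11 + c) < 2 ^ ((11 + c) + 1) :=
        Nat.xor_lt_two_pow hlt' (Nat.pow_lt_pow_right (by norm_num) (by omega))
      have hltn' : n ^^^ 2 ^ (11 + c) < 2 ^ (11 + c) := lt_of_testBit_false hlt2 hfalse
      have hdvd' : 2048 ∣ (n ^^^ 2 ^ (11 + c)) := by
        rw [dvd2048_iff] at hdvd ⊢
        rw [Nat.and_xor_distrib_right, hdvd]
        have hz : (2 ^ (11 + c)) &&& 2047 = 0 := by
          rw [Nat.land_comm, show (2047 : Nat) = 2 ^ 11 - 1 from rfl, Nat.and_two_pow,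
            Nat.testBit_two_pow_sub_one]
          simp
        rw [hz]
        simp
      have hsplit : n = 2 ^ (11 + c) ^^^ (n ^^^ 2 ^ (11 + c)) := by
        rw [Nat.xor_comm n (2 ^ (11 + c)), Nat.xor_xor_cancel_left]
      rw [hsplit, FA_linear, GB_linear, ih (by omega) _ hltn' hdvd', basis c (by omega)]
    · exact ih (by omega) n (lt_of_testBit_false hlt' (by simpa using hb)) hdvd

-- ===== VERDICT (by name: the statement is the Claim_ definition above) =====
theorem calculate_bch_3121_sum_spec : Claim_equal_calculate_bch_3121_sum := by
  intro x _
  unfold Spec_calculate_bch_3121_sum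
  have hM : (0 : Int) ≤ ADDRESS_MASK := by norm_num [ADDRESS_MASK]
  have h0 : 0 ≤ PySem.Int.band x ADDRESS_MASK := by
    rw [PySem.Int.band_comm]
    exact PySem.Int.band_nonneg_of_nonneg_left x hM
  set n := (PySem.Int.band x ADDRESS_MASK).toNat with hn
  have hd : PySem.Int.band x ADDRESS_MASK = (n : Int) := (Int.toNat_of_nonneg h0).symm
  have hfacts : n ≤ 4294965248 ∧ n &&& 2047 = 0 := by
    by_cases hx : 0 ≤ x
    · have hval : PySem.Int.band x ADDRESS_MASK = ((x.toNat &&& 4294965248 : Nat) : Int) := by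
        rw [PySem.Int.band_of_nonneg hx hM,
          show ADDRESS_MASK.toNat = 4294965248 from by decide]
      have hn2 : n = x.toNat &&& 4294965248 := by rw [hn, hval, Int.toNat_natCast]
      refine ⟨by rw [hn2]; exact Nat.and_le_right, ?_⟩
      rw [hn2, Nat.land_assoc, show ((4294965248 : Nat) &&& 2047) = 0 from by decide,
        Nat.and_zero]
    · have hval : PySem.Int.band x ADDRESS_MASK =
          ((4294965248 - (4294965248 &&& (-x - 1).toNat) : Nat) : Int) := by
        simp only [PySem.Int.band]
        rw [if_neg hx, if_pos hM, show ADDRESS_MASK.toNat = 4294965248 from by decide]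
      have hn2 : n = 4294965248 - (4294965248 &&& (-x - 1).toNat) := by
        rw [hn, hval, Int.toNat_natCast]
      refine ⟨by omega, ?_⟩
      rw [hn2, ← dvd2048_iff]
      refine Nat.dvd_sub (by decide) ?_
      rw [dvd2048_iff, Nat.land_comm 4294965248 _, Nat.land_assoc,
        show ((4294965248 : Nat) &&& 2047) = 0 from by decide, Nat.and_zero]
  obtain ⟨hle, hand⟩ := hfacts
  rw [bridgeA x n hd, bridgeB x n hd,
    main_ind 21 le_rfl n (by omega) ((dvd2048_iff n).mpr hand)]
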